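-- pv_equiv track=rewrite | github.com/FullIntelOpEngine/FIOE | webbridge_routes.py | _prioritize_cross_sector
-- ===== SOURCE A (Python) =====
-- def _prioritize_cross_sector(sets):
--     freq={}
--     for s in sets:
--         for c in s: freq[c]=freq.get(c,0)+1
--     cross=[c for c,f in freq.items() if f>1]; single=[c for c,f in freq.items() if f==1]
--     ordered=[]; seen=set()
--     for s in sets:
--         for c in s:
--             if c in cross and c not in seen: ordered.append(c); seen.add(c)
--     for s in sets:
--         for c in s:
--             if c in single and c not in seen: ordered.append(c); seen.add(c)
--     return ordered
-- ===== SOURCE B (Python) =====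
-- def _prioritize_cross_sector(sets):
--     freq = {}
--     for s in sets:
--         for c in s:
--             freq[c] = freq.get(c, 0) + 1
--     order = []
--     seen = set()
--     for s in sets:
--         for c in s:
--             if c not in seen:
--                 order.append(c)
--                 seen.add(c)
--     return [c for c in order if freq.get(c, 0) > 1] + [c for c in order if freq.get(c, 0) == 1]
-- ===== Notes on version B (the rewrite author's own statement) =====
-- stated objective: faster
-- what changed: A builds cross/single key lists and makes two separate scans over the raw sets testing 'c in cross'/'c in single' by list membership (O(k) per element); B makes one seen-guarded pass building the deduplicated first-appearance order and then partitions that short order list by a dict frequency lookup.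
import Mathlib
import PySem

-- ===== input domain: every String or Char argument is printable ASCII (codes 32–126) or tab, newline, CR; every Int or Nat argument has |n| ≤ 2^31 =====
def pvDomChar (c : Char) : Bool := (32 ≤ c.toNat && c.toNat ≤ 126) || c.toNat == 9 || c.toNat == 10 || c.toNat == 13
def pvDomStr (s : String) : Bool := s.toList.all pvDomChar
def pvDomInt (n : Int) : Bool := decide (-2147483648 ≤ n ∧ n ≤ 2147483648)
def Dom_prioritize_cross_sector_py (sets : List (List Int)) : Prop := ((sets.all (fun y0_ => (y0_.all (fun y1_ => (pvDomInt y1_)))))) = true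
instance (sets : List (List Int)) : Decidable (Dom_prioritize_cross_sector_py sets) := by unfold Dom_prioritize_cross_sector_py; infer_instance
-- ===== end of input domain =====

-- B replaces A's two rescans of `sets` with per-element list-membership tests by one dedup
-- ordering pass partitioned by a frequency lookup (objective: faster, O(n*k) -> O(n+k)).

-- ===== PORT A =====
def prioritize_cross_sector_py (sets : List (List Int)) : List Int :=
  let freq : PySem.Dict Int Int :=
    sets.foldl (fun d s => s.foldl (fun d c => d.insert c (d.getD c 0 + 1)) d) PySem.Dict.empty
  let cross : List Int := (freq.items.filter (fun kv => decide (kv.2 > 1))).map (fun kv => kv.1)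
  let single : List Int := (freq.items.filter (fun kv => kv.2 == 1)).map (fun kv => kv.1)
  let st1 : List Int × PySem.Set Int :=
    sets.foldl (fun os s => s.foldl (fun os c =>
      if cross.contains c && !(PySem.Set.contains os.2 c) then (os.1 ++ [c], PySem.Set.add os.2 c) else os) os)
      (([] : List Int), (PySem.Set.empty : PySem.Set Int))
  let st2 : List Int × PySem.Set Int :=
    sets.foldl (fun os s => s.foldl (fun os c =>
      if single.contains c && !(PySem.Set.contains os.2 c) then (os.1 ++ [c], PySem.Set.add os.2 c) else os) os)
      st1
  st2.1

-- ===== PORT B =====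
def prioritize_cross_sector_py_alt (sets : List (List Int)) : List Int :=
  let freq : PySem.Dict Int Int :=
    sets.foldl (fun d s => s.foldl (fun d c => d.insert c (d.getD c 0 + 1)) d) PySem.Dict.empty
  let st : List Int × PySem.Set Int :=
    sets.foldl (fun os s => s.foldl (fun os c =>
      if !(PySem.Set.contains os.2 c) then (os.1 ++ [c], PySem.Set.add os.2 c) else os) os)
      (([] : List Int), (PySem.Set.empty : PySem.Set Int))
  let order : List Int := st.1
  (order.filter (fun c => decide (freq.getD c 0 > 1))) ++ (order.filter (fun c => freq.getD c 0 == 1))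

-- ===== PRECONDITION & SPEC =====
def Spec_prioritize_cross_sector_py (sets : List (List Int)) (out : List Int) : Prop := out = prioritize_cross_sector_py_alt sets
instance (sets : List (List Int)) (out : List Int) : Decidable (Spec_prioritize_cross_sector_py sets out) := by unfold Spec_prioritize_cross_sector_py; infer_instance

-- ===== CLAIM (what is proved, stated in full; the proofs are below) =====
def Claim_equal_prioritize_cross_sector_py : Prop := ∀ (sets : List (List Int)), Dom_prioritize_cross_sector_py sets → Spec_prioritize_cross_sector_py sets (prioritize_cross_sector_py sets)

-- ===== LEMMAS AND PROOFS =====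

-- `pvPick p xs s`: the elements appended by a seen-guarded scan of xs with test p, starting from seen-set s.
def pvPick (p : Int → Bool) : List Int → List Int → List Int
  | [], _ => []
  | c :: t, s => if p c ∧ c ∉ s then c :: pvPick p t (s ++ [c]) else pvPick p t s

theorem pvScan_eq_pick (p : Int → Bool) : ∀ (xs o : List Int) (s : PySem.Set Int),
    xs.foldl (fun os c =>
      if p c && !(PySem.Set.contains os.2 c) then (os.1 ++ [c], PySem.Set.add os.2 c) else os) (o, s)
    = (o ++ pvPick p xs s, s ++ pvPick p xs s) := by
  intro xs
  induction xs with
  | nil => intro o s; simp [pvPick]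
  | cons c t ih =>
    intro o s
    rw [List.foldl_cons]
    by_cases hcc : p c = true ∧ c ∉ s
    · have hb : (p c && !(PySem.Set.contains s c)) = true := by
        simp [PySem.Set.contains, List.contains_eq_mem, hcc.1, hcc.2]
      have hadd : PySem.Set.add s c = s ++ [c] := by
        simp [PySem.Set.add, PySem.Set.contains, List.contains_eq_mem, hcc.2]
      show List.foldl _ (if (p c && !(PySem.Set.contains s c)) = true then (o ++ [c], PySem.Set.add s c) else (o, s)) t = _
      rw [if_pos hb, hadd, ih]
      simp only [pvPick, if_pos hcc]
      simp [List.append_assoc]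
    · have hb : (p c && !(PySem.Set.contains s c)) = false := by
        rcases Decidable.not_and_iff_not_or_not.mp hcc with h | h
        · simp [Bool.eq_false_iff.mpr h]
        · simp [PySem.Set.contains, List.contains_eq_mem, Decidable.not_not.mp h]
      show List.foldl _ (if (p c && !(PySem.Set.contains s c)) = true then (o ++ [c], PySem.Set.add s c) else (o, s)) t = _
      rw [hb]
      simp only [Bool.false_eq_true, if_false]
      rw [ih]
      simp only [pvPick, if_neg hcc]

-- a scan with test p, from seen s, is the p-filter of the plain dedup scan from any seen s'
-- agreeing with s on elements satisfying p
theorem pvPick_eq_filter (p : Int → Bool) : ∀ (xs s s' : List Int),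
    (∀ x, p x = true → (x ∈ s ↔ x ∈ s')) →
    pvPick p xs s = (pvPick (fun _ => true) xs s').filter p := by
  intro xs
  induction xs with
  | nil => intro s s' _; rfl
  | cons c t ih =>
    intro s s' hss
    simp only [pvPick]
    by_cases hp : p c = true
    · have hiff : c ∈ s ↔ c ∈ s' := hss c hp
      by_cases hc' : c ∈ s'
      · rw [if_neg (fun h => h.2 (hiff.mpr hc')), if_neg (fun (h : True ∧ c ∉ s') => h.2 hc')]
        exact ih s s' hss
      · have hc : c ∉ s := fun h => hc' (hiff.mp h)
        rw [if_pos ⟨hp, hc⟩, if_pos (⟨trivial, hc'⟩ : True ∧ c ∉ s'), List.filter_cons, hp]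
        simp only [if_pos]
        refine congrArg _ (ih (s ++ [c]) (s' ++ [c]) ?_)
        intro x hx
        simp only [List.mem_append, List.mem_singleton]
        rw [hss x hx]
    · have hp' : p c = false := by simpa using hp
      rw [if_neg (fun h => hp h.1)]
      by_cases hc' : c ∈ s'
      · rw [if_neg (fun (h : True ∧ c ∉ s') => h.2 hc')]
        exact ih s s' hss
      · rw [if_pos (⟨trivial, hc'⟩ : True ∧ c ∉ s'), List.filter_cons, hp']
        simp only [Bool.false_eq_true, if_false]
        refine ih s (s' ++ [c]) ?_
        intro x hx
        have hxc : x ≠ c := fun h => hp (h ▸ hx)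
        simp only [List.mem_append, List.mem_singleton]
        rw [hss x hx]
        simp [hxc]

theorem pvPick_mem_pred (p : Int → Bool) : ∀ (xs s : List Int) (x : Int),
    x ∈ pvPick p xs s → p x = true ∧ x ∈ xs := by
  intro xs
  induction xs with
  | nil => intro s x h; simp [pvPick] at h
  | cons c t ih =>
    intro s x h
    by_cases hcc : p c = true ∧ c ∉ s
    · simp only [pvPick, if_pos hcc] at h
      rcases List.mem_cons.mp h with h | h
      · subst h; exact ⟨hcc.1, List.mem_cons_self⟩
      · exact ⟨(ih (s ++ [c]) x h).1, List.mem_cons_of_mem _ (ih (s ++ [c]) x h).2⟩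
    · simp only [pvPick, if_neg hcc] at h
      exact ⟨(ih s x h).1, List.mem_cons_of_mem _ (ih s x h).2⟩

theorem pvCross_contains (xs : List Int) (c : Int) :
    ((((PySem.Dict.counter xs).items.filter (fun kv => decide (kv.2 > 1))).map (fun kv => kv.1)).contains c = true)
    ↔ (c ∈ xs ∧ 1 < xs.count c) := by
  simp [PySem.Dict.items_counter, List.mem_map, List.mem_filter, List.contains_eq_mem,
        PySem.Set.mem_ofList]

theorem pvSingle_contains (xs : List Int) (c : Int) :
    ((((PySem.Dict.counter xs).items.filter (fun kv => kv.2 == 1)).map (fun kv => kv.1)).contains c = true)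
    ↔ (xs.count c = 1) := by
  simp [PySem.Dict.items_counter, List.mem_map, List.mem_filter, List.contains_eq_mem,
        PySem.Set.mem_ofList]
  intro h
  exact List.count_pos_iff.mp (by omega)

-- B's dedup loop is the scan with the always-true test (true && b = b definitionally)
theorem pvScan_true_eq_pick (xs o : List Int) (s : PySem.Set Int) :
    xs.foldl (fun os c =>
      if !(PySem.Set.contains os.2 c) then (os.1 ++ [c], PySem.Set.add os.2 c) else os) (o, s)
    = (o ++ pvPick (fun _ => true) xs s, s ++ pvPick (fun _ => true) xs s) :=
  pvScan_eq_pick (fun _ => true) xs o s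

-- ===== VERDICT (by name: the statement is the Claim_ definition above) =====
theorem prioritize_cross_sector_py_spec : Claim_equal_prioritize_cross_sector_py := by
  intro sets _
  unfold Spec_prioritize_cross_sector_py prioritize_cross_sector_py prioritize_cross_sector_py_alt
  simp only [← List.foldl_flatten, PySem.Dict.foldl_insert_getD_add_one_eq_counter]
  rw [pvScan_eq_pick, pvScan_eq_pick, pvScan_true_eq_pick]
  simp only [List.nil_append, PySem.Set.empty]
  have hsingle :
      pvPick (List.map (fun kv => kv.1)
          (List.filter (fun kv => kv.2 == 1) (PySem.Dict.counter sets.flatten).items)).contains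
        sets.flatten
        (pvPick (List.map (fun kv => kv.1)
            (List.filter (fun kv => decide (kv.2 > 1)) (PySem.Dict.counter sets.flatten).items)).contains
          sets.flatten [])
      = (pvPick (fun _ => true) sets.flatten []).filter
          (List.map (fun kv => kv.1)
            (List.filter (fun kv => kv.2 == 1) (PySem.Dict.counter sets.flatten).items)).contains := by
    refine pvPick_eq_filter _ sets.flatten _ [] ?_
    intro x hx
    simp only [List.not_mem_nil, iff_false]
    intro hmem
    have hcross := (pvPick_mem_pred _ sets.flatten [] x hmem).1
    have h1 := (pvCross_contains sets.flatten x).mp hcross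
    have h2 := (pvSingle_contains sets.flatten x).mp hx
    omega
  have hcross :
      pvPick (List.map (fun kv => kv.1)
          (List.filter (fun kv => decide (kv.2 > 1)) (PySem.Dict.counter sets.flatten).items)).contains
        sets.flatten []
      = (pvPick (fun _ => true) sets.flatten []).filter
          (List.map (fun kv => kv.1)
            (List.filter (fun kv => decide (kv.2 > 1)) (PySem.Dict.counter sets.flatten).items)).contains :=
    pvPick_eq_filter _ sets.flatten [] [] (fun _ _ => Iff.rfl)
  rw [hsingle, hcross]
  have hcf :
      (pvPick (fun _ => true) sets.flatten []).filter
          (List.map (fun kv => kv.1)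
            (List.filter (fun kv => decide (kv.2 > 1)) (PySem.Dict.counter sets.flatten).items)).contains
      = (pvPick (fun _ => true) sets.flatten []).filter
          (fun c => decide ((PySem.Dict.counter sets.flatten).getD c 0 > 1)) := by
    refine List.filter_congr ?_
    intro x hxmem
    have hxs : x ∈ sets.flatten := (pvPick_mem_pred _ sets.flatten [] x hxmem).2
    rw [Bool.eq_iff_iff, pvCross_contains]
    simp only [PySem.Dict.getD_counter, decide_eq_true_eq]
    constructor
    · rintro ⟨_, h⟩; exact_mod_cast h
    · intro h; exact ⟨hxs, by exact_mod_cast h⟩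
  have hsf :
      (pvPick (fun _ => true) sets.flatten []).filter
          (List.map (fun kv => kv.1)
            (List.filter (fun kv => kv.2 == 1) (PySem.Dict.counter sets.flatten).items)).contains
      = (pvPick (fun _ => true) sets.flatten []).filter
          (fun c => (PySem.Dict.counter sets.flatten).getD c 0 == 1) := by
    refine List.filter_congr ?_
    intro x hxmem
    rw [Bool.eq_iff_iff, pvSingle_contains]
    simp only [PySem.Dict.getD_counter, beq_iff_eq]
    constructor
    · intro h; exact_mod_cast h
    · intro h; exact_mod_cast h
  rw [hcf, hsf]
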